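-- pv_equiv track=rewrite | github.com/MForofontov/python_utils | iterable_functions/set_operations/get_shared_elements.py | get_shared_elements
-- ===== SOURCE A (Python) =====
-- from collections import Counter
-- from typing import TypeVar
--
-- T = TypeVar("T")
--
-- def get_shared_elements(dict_: dict[str, list[T]]) -> list[T]:
--     """
--     Identify elements that appear in at least two lists within a dictionary.
--
--     Parameters
--     ----------
--     dict_ : dict[str, list[T]]
--         A dictionary where the values are lists of elements.
--
--     Returns
--     -------
--     list[T]
--         A list containing elements that appear in at least two lists within the dictionary.
--
--     Raises
--     ------
--     TypeError
--         If dict_ is not a dictionary or if any value in dict_ is not a list.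
--     ValueError
--         If any list contains unhashable elements.
--     """
--     if not isinstance(dict_, dict):
--         raise TypeError("dict_ must be a dictionary")
--     if not all(isinstance(value, list) for value in dict_.values()):
--         raise TypeError("All values in dict_ must be lists")
--
--     all_elements = []
--     for sublist in dict_.values():
--         try:
--             all_elements.extend(sublist)
--         except TypeError as exc:
--             raise TypeError(
--                 f"Sublist contains unhashable elements: {exc}"
--             ) from exc
--
--     element_counts = Counter(all_elements)
--     shared_elements = [elem for elem, count in element_counts.items() if count >= 2]
--     return shared_elements
-- ===== SOURCE B (Python) =====
-- def get_shared_elements(dict_):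
--     if not isinstance(dict_, dict):
--         raise TypeError("dict_ must be a dictionary")
--     if not all(isinstance(value, list) for value in dict_.values()):
--         raise TypeError("All values in dict_ must be lists")
--
--     all_elements = []
--     for sublist in dict_.values():
--         try:
--             all_elements.extend(sublist)
--         except TypeError as exc:
--             raise TypeError(
--                 f"Sublist contains unhashable elements: {exc}"
--             ) from exc
--
--     # brute force: keep each element at its first position iff it occurs again later
--     return [x for i, x in enumerate(all_elements)
--             if x not in all_elements[:i] and x in all_elements[i + 1:]]
-- ===== Notes on version B (the rewrite author's own statement) =====
-- stated objective: alternative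
-- what changed: Counter-based counting pass replaced by a brute-force positional scan: an element is emitted at its first position iff it does not occur in the prefix before it and occurs again in the suffix after it; no counting and no hash table.
import Mathlib
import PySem

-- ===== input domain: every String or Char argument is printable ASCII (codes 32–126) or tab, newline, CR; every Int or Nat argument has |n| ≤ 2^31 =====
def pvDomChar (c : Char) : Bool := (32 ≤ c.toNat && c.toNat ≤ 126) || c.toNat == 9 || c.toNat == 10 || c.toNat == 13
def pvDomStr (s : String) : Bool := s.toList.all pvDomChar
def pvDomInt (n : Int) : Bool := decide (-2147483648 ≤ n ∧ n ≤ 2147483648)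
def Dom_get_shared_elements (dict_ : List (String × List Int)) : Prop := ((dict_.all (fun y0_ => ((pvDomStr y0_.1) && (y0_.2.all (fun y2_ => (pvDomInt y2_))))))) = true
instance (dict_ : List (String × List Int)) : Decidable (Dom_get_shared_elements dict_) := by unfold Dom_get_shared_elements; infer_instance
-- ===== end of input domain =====

-- B replaces A's Counter pass by a brute-force positional scan (first occurrence with a later
-- occurrence); alternative algorithm, no hash counting. Return value only.

-- shared faithful reading of the input: dict_.values() of the Python dict, then the flatten loop
-- (this line is identical in A and B, so both ports use it)
def pvAllElements (dict_ : List (String × List Int)) : List Int :=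
  ((dict_.foldl (fun d p => d.insert p.1 p.2) (PySem.Dict.empty)).values).foldl
    (fun acc sublist => acc ++ sublist) []

-- ===== PORT A =====
def get_shared_elements (dict_ : List (String × List Int)) : List Int :=
  let all_elements := pvAllElements dict_
  let element_counts := PySem.Dict.counter all_elements
  (element_counts.items.filter (fun p => 2 ≤ p.2)).map (·.1)

-- ===== PORT B =====
def get_shared_elements_alt (dict_ : List (String × List Int)) : List Int :=
  let all_elements := pvAllElements dict_
  ((PySem.List.enumerate all_elements).filter
      (fun ix => !(PySem.List.slice all_elements none (some ix.1)).contains ix.2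
                 && (PySem.List.slice all_elements (some (ix.1 + 1)) none).contains ix.2)).map (·.2)

-- ===== PRECONDITION & SPEC =====
def Spec_get_shared_elements (dict_ : List (String × List Int)) (out : List Int) : Prop := out = get_shared_elements_alt dict_
instance (dict_ : List (String × List Int)) (out : List Int) : Decidable (Spec_get_shared_elements dict_ out) := by unfold Spec_get_shared_elements; infer_instance

-- ===== CLAIM (what is proved, stated in full; the proofs are below) =====
def Claim_equal_get_shared_elements : Prop := ∀ (dict_ : List (String × List Int)), Dom_get_shared_elements dict_ → Spec_get_shared_elements dict_ (get_shared_elements dict_)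

-- ===== LEMMAS AND PROOFS =====

-- B's scan, one suffix xs of the full list at a time (pre ++ xs = full): an element of xs is
-- kept iff its position is a first occurrence in full and it recurs later; that is exactly the
-- first occurrences of xs that are new w.r.t. pre and have total count ≥ 2 in full.
lemma scan_eq (full : List Int) : ∀ (xs pre : List Int), full = pre ++ xs →
    ((PySem.List.enumerate xs (pre.length : Int)).filter
        (fun ix => !(PySem.List.slice full none (some ix.1)).contains ix.2
                   && (PySem.List.slice full (some (ix.1 + 1)) none).contains ix.2)).map (·.2)
    = (PySem.List.dedup xs).filter
        (fun y => !pre.contains y && decide (2 ≤ full.count y)) := by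
  intro xs
  induction xs with
  | nil =>
    intro pre h
    simp [PySem.List.enumerate_nil, PySem.List.dedup]
  | cons y ys ih =>
    intro pre h
    have htake : PySem.List.slice full none (some ((pre.length : Int))) = pre := by
      rw [PySem.List.slice_to _ (by positivity)]
      simp [h, List.take_left']
    have hdrop : PySem.List.slice full (some ((pre.length : Int) + 1)) none = ys := by
      rw [PySem.List.slice_from _ (by positivity)]
      have : ((pre.length : Int) + 1).toNat = pre.length + 1 := by omega
      rw [this, h]
      rw [show pre.length + 1 = (pre ++ [y]).length by simp, show pre ++ y :: ys = (pre ++ [y]) ++ ys by simp,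
        List.drop_left]
    have hih := ih (pre ++ [y]) (by simp [h])
    rw [PySem.List.enumerate_cons, List.filter_cons]
    rw [show ((pre ++ [y]).length : Int) = (pre.length : Int) + 1 by simp] at hih
    rw [htake, hdrop]
    -- unify the tail via IH, then case on the head condition
    have hded : PySem.List.dedup (y :: ys)
        = y :: (PySem.List.dedup ys).filter (fun z => !(z == y)) := by
      simp only [PySem.List.dedup, PySem.Set.ofList_cons]
      rfl
    rw [hded, List.filter_cons]
    by_cases hyp : y ∈ pre
    · have h1 : (!pre.contains y && (decide (2 ≤ full.count y))) = false := by
        simp [hyp]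
      have h2 : (!pre.contains y && ys.contains y) = false := by simp [hyp]
      rw [h1, h2, if_neg Bool.false_ne_true, if_neg Bool.false_ne_true, hih,
        List.filter_filter]
      refine List.filter_congr ?_
      intro z hz
      by_cases hzy : z = y
      · subst hzy; simp [hyp]
      · simp [hzy]
    · have hcount : full.count y = 1 + ys.count y := by
        rw [h]
        simp [List.count_append]
        have : pre.count y = 0 := List.count_eq_zero.mpr hyp
        omega
      have hhead : (!pre.contains y && ys.contains y)
          = (!pre.contains y && decide (2 ≤ full.count y)) := by
        have : (ys.contains y) = decide (2 ≤ full.count y) := by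
          rw [hcount]
          rcases Bool.eq_false_or_eq_true (ys.contains y) with hc | hc
          · have h1 : 1 ≤ ys.count y := List.one_le_count_iff.mpr (by simpa using hc)
            simp only [hc, true_eq_decide_iff]
            omega
          · have h0 : ys.count y = 0 := List.count_eq_zero.mpr (by simpa using hc)
            simp only [hc, false_eq_decide_iff]
            omega
        rw [this]
      rw [hhead]
      have htail : (PySem.List.dedup ys).filter (fun z => !(pre ++ [y]).contains z && decide (2 ≤ full.count z))
          = ((PySem.List.dedup ys).filter (fun z => !(z == y))).filter
              (fun z => !pre.contains z && decide (2 ≤ full.count z)) := by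
        rw [List.filter_filter]
        refine List.filter_congr ?_
        intro z _
        by_cases hzy : z = y
        · subst hzy; simp
        · simp [hzy]
      by_cases hc : (!pre.contains y && decide (2 ≤ full.count y)) = true
      · rw [if_pos hc, if_pos hc, List.map_cons, hih, htail]
      · rw [if_neg hc, if_neg hc, hih, htail]

theorem get_shared_elements_spec : Claim_equal_get_shared_elements := by
  intro dict_ _
  unfold Spec_get_shared_elements get_shared_elements get_shared_elements_alt
  have hm := scan_eq (pvAllElements dict_) (pvAllElements dict_) [] (by simp)
  simp only [List.length_nil, Nat.cast_zero] at hm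
  dsimp only
  rw [hm]
  simp only [PySem.Dict.items_counter, List.filter_map, List.map_map, Function.comp_def,
    List.map_id', PySem.List.dedup]
  refine (List.filter_congr ?_).symm
  intro a _
  simp
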